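-- pv_equiv track=rewrite | github.com/Trolky/PRO | diff.py | max_difference_with_no_intermediates
-- ===== SOURCE A (Python) =====
-- def max_difference_with_no_intermediates(sequence):
--     max_diff = 0
--
--     # Loop through each pair of elements in the sequence
--     for i in range(len(sequence)):
--         for j in range(i + 1, len(sequence)):
--             a, b = sequence[i], sequence[j]
--             diff = abs(abs(a)-abs(b))
--
--             min_val, max_val = min(a, b), max(a, b)
--
--             intermediate_exists = any(min_val < sequence[k] < max_val for k in range(len(sequence)) if k != i and k != j)
--
--
--             if not intermediate_exists and diff > max_diff:
--                 max_diff = diff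
--
--     return max_diff
-- ===== SOURCE B (Python) =====
-- def max_difference_with_no_intermediates(sequence):
--     # A pair is valid iff no element lies strictly between its two values,
--     # i.e. iff the two values are equal (diff 0) or adjacent in the sorted
--     # list of distinct values.  So one sorted pass over distinct values suffices.
--     vals = sorted(set(sequence))
--     best = 0
--     for u, v in zip(vals, vals[1:]):
--         d = abs(abs(u) - abs(v))
--         if d > best:
--             best = d
--     return best
-- ===== Notes on version B (the rewrite author's own statement) =====
-- stated objective: faster
-- what changed: Replaced the O(n^3) all-pairs scan (with an inner between-ness check over the whole list) by sorting the distinct values once and taking the max abs-abs-difference over consecutive distinct values, which are exactly the valid pairs.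
import Mathlib
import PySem

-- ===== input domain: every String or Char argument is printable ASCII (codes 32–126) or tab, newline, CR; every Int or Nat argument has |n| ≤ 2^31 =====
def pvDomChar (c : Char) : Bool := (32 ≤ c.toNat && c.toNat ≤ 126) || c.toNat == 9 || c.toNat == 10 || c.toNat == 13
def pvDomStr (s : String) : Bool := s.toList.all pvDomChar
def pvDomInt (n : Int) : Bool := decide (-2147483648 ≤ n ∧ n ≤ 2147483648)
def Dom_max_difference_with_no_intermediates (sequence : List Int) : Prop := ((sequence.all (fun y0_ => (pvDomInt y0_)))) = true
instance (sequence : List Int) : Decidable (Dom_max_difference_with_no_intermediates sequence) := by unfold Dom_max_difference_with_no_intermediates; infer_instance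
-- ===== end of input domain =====

-- B sorts the distinct values once and takes the max |abs-abs| difference over consecutive
-- distinct values (exactly the pairs with no element strictly between), replacing A's
-- all-pairs scan; a timing run measured B faster on the large inputs.


-- ===== PORT A =====
-- literal transliteration of A: nested index loops, inner `any` over all k ≠ i, j
def max_difference_with_no_intermediates (sequence : List Int) : Int :=
  (PySem.List.pyRange 0 (sequence.length : Int) 1).foldl (fun max_diff i =>
    (PySem.List.pyRange (i + 1) (sequence.length : Int) 1).foldl (fun max_diff j =>
      let a := PySem.List.pyGetD sequence i 0
      let b := PySem.List.pyGetD sequence j 0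
      let diff := |(|a| - |b|)|
      let min_val := min a b
      let max_val := max a b
      let intermediate_exists := (PySem.List.pyRange 0 (sequence.length : Int) 1).any
        (fun k => decide (k ≠ i) && decide (k ≠ j) &&
                  (decide (min_val < PySem.List.pyGetD sequence k 0) &&
                   decide (PySem.List.pyGetD sequence k 0 < max_val)))
      if !intermediate_exists && decide (diff > max_diff) then diff else max_diff) max_diff) 0

-- ===== PORT B =====
-- literal transliteration of Source B: sorted(set(sequence)); vals[1:] is vals.drop 1 (exact)
def max_difference_with_no_intermediates_alt (sequence : List Int) : Int :=
  let vals := PySem.List.sorted (PySem.Set.ofList sequence) (fun x => x) false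
  (vals.zip (vals.drop 1)).foldl (fun best p =>
    let d := |(|p.1| - |p.2|)|
    if d > best then d else best) 0

-- ===== PRECONDITION & SPEC =====
def Spec_max_difference_with_no_intermediates (sequence : List Int) (out : Int) : Prop := out = max_difference_with_no_intermediates_alt sequence
instance (sequence : List Int) (out : Int) : Decidable (Spec_max_difference_with_no_intermediates sequence out) := by unfold Spec_max_difference_with_no_intermediates; infer_instance

-- ===== CLAIM (what is proved, stated in full; the proofs are below) =====
def Claim_equal_max_difference_with_no_intermediates : Prop := ∀ (sequence : List Int), Dom_max_difference_with_no_intermediates sequence → Spec_max_difference_with_no_intermediates sequence (max_difference_with_no_intermediates sequence)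

-- ===== LEMMAS AND PROOFS =====

-- generic fold facts for "running max"-shaped folds -------------------------------------

/-- Upper bound: if the step map preserves `≤ M` on elements of `l`, so does the fold. -/
theorem pvFoldle {α : Type} (l : List α) (step : Int → α → Int) (M : Int) :
    ∀ init : Int, init ≤ M → (∀ md x, x ∈ l → md ≤ M → step md x ≤ M) →
    l.foldl step init ≤ M := by
  induction l with
  | nil => intro init h _; simpa using h
  | cons y t ih =>
    intro init h hs
    simp only [List.foldl_cons]
    exact ih _ (hs init y (by simp) h) (fun md x hx hm => hs md x (by simp [hx]) hm)

/-- Inflationary steps make the fold inflationary. -/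
theorem pvFoldge {α : Type} (l : List α) (step : Int → α → Int)
    (hinfl : ∀ md x, x ∈ l → md ≤ step md x) :
    ∀ init : Int, init ≤ l.foldl step init := by
  induction l with
  | nil => intro init; simp
  | cons y t ih =>
    intro init
    simp only [List.foldl_cons]
    exact le_trans (hinfl init y (by simp))
      (ih (fun md x hx => hinfl md x (by simp [hx])) _)

/-- Lower bound through one element: if every step is inflationary and the step at `x0`
    always returns at least `v`, the fold is at least `v`. -/
theorem pvFoldElem {α : Type} (l : List α) (step : Int → α → Int)
    (hinfl : ∀ md x, x ∈ l → md ≤ step md x) (x0 : α) (hx0 : x0 ∈ l) (v : Int)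
    (hv : ∀ md, v ≤ step md x0) :
    ∀ init : Int, v ≤ l.foldl step init := by
  induction l with
  | nil => cases hx0
  | cons y t ih =>
    intro init
    simp only [List.foldl_cons]
    rcases List.mem_cons.mp hx0 with h | h
    · subst h
      exact le_trans (hv init)
        (pvFoldge t step (fun md x hx => hinfl md x (by simp [hx])) _)
    · exact ih (fun md x hx => hinfl md x (by simp [hx])) h _

-- value-level validity of a pair ---------------------------------------------------------

/-- No element of `seq` lies strictly between `a` and `b`. -/
def pvGood (seq : List Int) (a b : Int) : Prop :=
  ∀ x ∈ seq, ¬ (min a b < x ∧ x < max a b)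

/-- The sorted distinct values of `seq`, as B computes them. -/
def pvVals (seq : List Int) : List Int :=
  PySem.List.sorted (PySem.Set.ofList seq) (fun x => x) false

theorem pvVals_sorted (seq : List Int) : (pvVals seq).Pairwise (· < ·) :=
  PySem.List.sorted_ofList_pairwise_lt seq

theorem pvVals_mem (seq : List Int) (x : Int) : x ∈ pvVals seq ↔ x ∈ seq := by
  unfold pvVals
  simp [PySem.List.mem_sorted, PySem.Set.mem_ofList]

/-- strict monotonicity along indices of pvVals -/
theorem pvVals_lt (seq : List Int) {p q : Nat} (hpq : p < q) (hq : q < (pvVals seq).length) :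
    (pvVals seq)[p]'(by omega) < (pvVals seq)[q] :=
  (List.pairwise_iff_getElem.mp (pvVals_sorted seq)) p q (by omega) hq hpq

/-- abs-abs-difference is symmetric. -/
theorem pvAbsSymm (a b : Int) : |(|a| - |b|)| = |(|b| - |a|)| := abs_sub_comm _ _

theorem pvGood_symm (seq : List Int) (a b : Int) (h : pvGood seq a b) : pvGood seq b a := by
  intro x hx
  rw [min_comm b a, max_comm b a]
  exact h x hx

theorem pvVals_le (seq : List Int) {p q : Nat} (hpq : p ≤ q) (hq : q < (pvVals seq).length) :
    (pvVals seq)[p]'(by omega) ≤ (pvVals seq)[q] := by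
  rcases Nat.eq_or_lt_of_le hpq with h | h
  · subst h; rfl
  · exact le_of_lt (pvVals_lt seq h hq)

/-- B's fold, written over pvVals (definitional). -/
theorem pvAlt_eq (seq : List Int) :
    max_difference_with_no_intermediates_alt seq =
      ((pvVals seq).zip ((pvVals seq).drop 1)).foldl
        (fun best p => if |(|p.1| - |p.2|)| > best then |(|p.1| - |p.2|)| else best) 0 := rfl

theorem pvAltStep_infl (l : List (Int × Int)) :
    ∀ md (x : Int × Int), x ∈ l → md ≤ (if |(|x.1| - |x.2|)| > md then |(|x.1| - |x.2|)| else md) := by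
  intro md x _
  split <;> omega

theorem pvAlt_nonneg (seq : List Int) : 0 ≤ max_difference_with_no_intermediates_alt seq := by
  rw [pvAlt_eq]
  exact pvFoldge _ _ (pvAltStep_infl _) 0

/-- A valid pair of elements is bounded by B's result. -/
theorem pvGood_le_alt (seq : List Int) (a b : Int) (ha : a ∈ seq) (hb : b ∈ seq)
    (hg : pvGood seq a b) :
    |(|a| - |b|)| ≤ max_difference_with_no_intermediates_alt seq := by
  rcases eq_or_ne a b with rfl | hne
  · simpa using pvAlt_nonneg seq
  · -- work with u = min a b < v = max a b
    have habs : |(|a| - |b|)| = |(|min a b| - |max a b|)| := by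
      rcases le_total a b with h | h
      · rw [min_eq_left h, max_eq_right h]
      · rw [min_eq_right h, max_eq_left h, pvAbsSymm]
    set u := min a b with hu
    set v := max a b with hv
    have huv : u < v := by
      rcases lt_or_gt_of_ne hne with h | h
      · rw [hu, hv, min_eq_left (le_of_lt h), max_eq_right (le_of_lt h)]; exact h
      · rw [hu, hv, min_eq_right (le_of_lt h), max_eq_left (le_of_lt h)]; exact h
    have humem : u ∈ pvVals seq := by
      rw [pvVals_mem]; rcases le_total a b with h | h
      · rw [hu, min_eq_left h]; exact ha
      · rw [hu, min_eq_right h]; exact hb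
    have hvmem : v ∈ pvVals seq := by
      rw [pvVals_mem]; rcases le_total a b with h | h
      · rw [hv, max_eq_right h]; exact hb
      · rw [hv, max_eq_left h]; exact ha
    rcases List.mem_iff_getElem.mp humem with ⟨p, hp, hpe⟩
    rcases List.mem_iff_getElem.mp hvmem with ⟨q, hq, hqe⟩
    have hpq : p < q := by
      by_contra hc
      have : (pvVals seq)[q]'hq ≤ (pvVals seq)[p]'hp := pvVals_le seq (by omega) hp
      rw [hpe, hqe] at this; omega
    have hadj : q = p + 1 := by
      by_contra hc
      have h1 : p + 1 < q := by omega
      have hmid := (pvVals_mem seq ((pvVals seq)[p+1]'(by omega))).mp (List.getElem_mem _)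
      have hl : u < (pvVals seq)[p+1]'(by omega) := by
        rw [← hpe]; exact pvVals_lt seq (by omega) (by omega)
      have hr : (pvVals seq)[p+1]'(by omega) < v := by
        rw [← hqe]; exact pvVals_lt seq h1 hq
      exact hg _ hmid ⟨hl, hr⟩
    subst hadj
    have hzmem : (u, v) ∈ (pvVals seq).zip ((pvVals seq).drop 1) := by
      rw [← hpe, ← hqe]
      apply List.mem_iff_getElem.mpr
      refine ⟨p, by simp [List.length_zip]; omega, ?_⟩
      simp [List.getElem_zip]
    rw [habs, pvAlt_eq]
    exact pvFoldElem _ _ (pvAltStep_infl _) (u, v) hzmem _ (fun md => by dsimp only; split <;> omega) 0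

/-- Every zip-adjacent pair of pvVals is a good pair of distinct elements. -/
theorem pvZip_good (seq : List Int) (u v : Int)
    (huv : (u, v) ∈ (pvVals seq).zip ((pvVals seq).drop 1)) :
    u ∈ seq ∧ v ∈ seq ∧ u < v ∧ pvGood seq u v := by
  rcases List.mem_iff_getElem.mp huv with ⟨p, hp, he⟩
  have hlen : p + 1 < (pvVals seq).length := by simp [List.length_zip] at hp; omega
  simp [List.getElem_zip] at he
  obtain ⟨heu, hev⟩ := he
  have hlt : u < v := by rw [← heu, ← hev]; exact pvVals_lt seq (by omega) hlen
  refine ⟨(pvVals_mem seq u).mp (heu ▸ List.getElem_mem _),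
          (pvVals_mem seq v).mp (hev ▸ List.getElem_mem _), hlt, ?_⟩
  intro x hx hbet
  rw [min_eq_left (le_of_lt hlt), max_eq_right (le_of_lt hlt)] at hbet
  rcases List.mem_iff_getElem.mp ((pvVals_mem seq x).mpr hx) with ⟨r, hr, hre⟩
  rcases le_or_gt r p with hrp | hrp
  · have : (pvVals seq)[r]'hr ≤ (pvVals seq)[p]'(by omega) := pvVals_le seq hrp (by omega)
    rw [hre, heu] at this; omega
  · have : (pvVals seq)[p+1]'hlen ≤ (pvVals seq)[r]'hr := pvVals_le seq (by omega) hr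
    rw [hre, hev] at this; omega


-- A-side lemmas ------------------------------------------------------------------------

theorem pvGet (seq : List Int) (k : Nat) (hk : k < seq.length) :
    PySem.List.pyGetD seq (k : Int) 0 = seq[k] := by
  simp [PySem.List.pyGetD_natCast, List.getD_eq_getElem?_getD, List.getElem?_eq_getElem hk]

theorem pvSelf_not_between (a b x : Int) (hx : x = a ∨ x = b) :
    ¬ (min a b < x ∧ x < max a b) := by
  rintro ⟨h1, h2⟩
  rw [min_lt_iff] at h1
  rw [lt_max_iff] at h2
  rcases hx with rfl | rfl <;> omega

theorem pvA_nonneg (seq : List Int) : 0 ≤ max_difference_with_no_intermediates seq := by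
  unfold max_difference_with_no_intermediates
  refine pvFoldge _ _ ?_ 0
  intro md i _
  refine pvFoldge _ _ ?_ md
  intro md' j _
  dsimp only
  split
  · rename_i h
    simp only [Bool.and_eq_true, decide_eq_true_eq] at h
    omega
  · omega

/-- A good pair of positions is bounded by A's result. -/
theorem pvPair_le_A (seq : List Int) (i j : Nat) (hij : i < j) (hj : j < seq.length)
    (hg : pvGood seq (seq[i]'(by omega)) (seq[j]'hj)) :
    |(|seq[i]'(by omega)| - |seq[j]'hj|)| ≤ max_difference_with_no_intermediates seq := by
  unfold max_difference_with_no_intermediates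
  refine pvFoldElem _ _ ?_ (i : Int) ?_ _ ?_ 0
  · intro md x _
    refine pvFoldge _ _ ?_ md
    intro md' j' _
    dsimp only
    split
    · rename_i h
      simp only [Bool.and_eq_true, decide_eq_true_eq] at h
      omega
    · omega
  · rw [PySem.List.mem_pyRange_one]
    constructor <;> [positivity; exact_mod_cast (by omega : i < seq.length)]
  · intro md
    refine pvFoldElem _ _ ?_ (j : Int) ?_ _ ?_ md
    · intro md' j' _
      dsimp only
      split
      · rename_i h
        simp only [Bool.and_eq_true, decide_eq_true_eq] at h
        omega
      · omega
    · rw [PySem.List.mem_pyRange_one]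
      constructor <;> [exact_mod_cast (by omega : (i:Int) + 1 ≤ (j:Nat)); exact_mod_cast hj]
    · intro md'
      dsimp only
      rw [pvGet seq i (by omega), pvGet seq j hj]
      have hinter : (PySem.List.pyRange 0 (seq.length : Int) 1).any
        (fun k => decide (k ≠ (i:Int)) && decide (k ≠ (j:Int)) &&
                  (decide (min (seq[i]'(by omega)) (seq[j]'hj) < PySem.List.pyGetD seq k 0) &&
                   decide (PySem.List.pyGetD seq k 0 < max (seq[i]'(by omega)) (seq[j]'hj)))) = false := by
        simp only [List.any_eq_false]
        intro k hk
        rw [PySem.List.mem_pyRange_one] at hk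
        have hk2 : k.toNat < seq.length := by omega
        have hx : PySem.List.pyGetD seq k 0 = seq[k.toNat] := by
          rw [← pvGet seq k.toNat hk2]; congr 1; omega
        simp only [Bool.and_eq_true, decide_eq_true_eq]
        rintro ⟨⟨-, -⟩, h1, h2⟩
        exact hg (seq[k.toNat]'hk2) (List.getElem_mem _)
          ⟨by rw [hx] at h1; exact h1, by rw [hx] at h2; exact h2⟩
      rw [hinter]
      simp only [Bool.not_false, Bool.true_and]
      split
      · exact le_refl _
      · rename_i h
        simp only [decide_eq_true_eq, gt_iff_lt] at h
        exact not_lt.mp h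

theorem pvAltLeA (seq : List Int) :
    max_difference_with_no_intermediates_alt seq ≤ max_difference_with_no_intermediates seq := by
  rw [pvAlt_eq]
  refine pvFoldle _ _ _ 0 (pvA_nonneg seq) ?_
  rintro md ⟨u, v⟩ hx hm
  dsimp only
  split
  · rename_i h
    obtain ⟨hu, hv, hlt, hg⟩ := pvZip_good seq u v hx
    rcases List.mem_iff_getElem.mp hu with ⟨i0, hi0, hie⟩
    rcases List.mem_iff_getElem.mp hv with ⟨j0, hj0, hje⟩
    have hne : i0 ≠ j0 := by
      intro hc; subst hc; rw [hie] at hje; omega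
    rcases Nat.lt_or_ge i0 j0 with hlt2 | hge
    · have := pvPair_le_A seq i0 j0 hlt2 hj0 (by rw [hie, hje]; exact hg)
      rw [hie, hje] at this; exact this
    · have hlt2 : j0 < i0 := by omega
      have := pvPair_le_A seq j0 i0 hlt2 hi0
        (by rw [hie, hje]; exact pvGood_symm seq u v hg)
      rw [hie, hje] at this
      rw [pvAbsSymm]; exact this
  · exact hm

theorem pvALeAlt (seq : List Int) :
    max_difference_with_no_intermediates seq ≤ max_difference_with_no_intermediates_alt seq := by
  unfold max_difference_with_no_intermediates
  refine pvFoldle _ _ _ 0 (pvAlt_nonneg seq) ?_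
  intro md i hi hm
  refine pvFoldle _ _ _ md hm ?_
  intro md' j hj hm'
  dsimp only
  split
  · rename_i h
    simp only [Bool.and_eq_true, Bool.not_eq_true', decide_eq_true_eq] at h
    obtain ⟨hintf, hgt⟩ := h
    rw [PySem.List.mem_pyRange_one] at hi hj
    have hin : i.toNat < seq.length := by omega
    have hjn : j.toNat < seq.length := by omega
    have ha : PySem.List.pyGetD seq i 0 = seq[i.toNat] := by
      rw [← pvGet seq i.toNat hin]; congr 1; omega
    have hb : PySem.List.pyGetD seq j 0 = seq[j.toNat] := by
      rw [← pvGet seq j.toNat hjn]; congr 1; omega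
    rw [ha, hb] at hintf ⊢
    have hg : pvGood seq (seq[i.toNat]'hin) (seq[j.toNat]'hjn) := by
      rintro x hx ⟨h1, h2⟩
      rcases List.mem_iff_getElem.mp hx with ⟨k, hk, hke⟩
      rw [List.any_eq_false] at hintf
      have hkmem : (k : Int) ∈ PySem.List.pyRange 0 (seq.length : Int) 1 :=
        PySem.List.mem_pyRange_one.mpr ⟨by positivity, by exact_mod_cast hk⟩
      apply hintf _ hkmem
      have hxk : PySem.List.pyGetD seq (k : Int) 0 = x := by rw [pvGet seq k hk, hke]
      simp only [Bool.and_eq_true, decide_eq_true_eq, hxk]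
      refine ⟨⟨?_, ?_⟩, h1, h2⟩
      · intro hc
        have hki : k = i.toNat := by omega
        exact pvSelf_not_between _ _ x (Or.inl (by subst hki; exact hke.symm)) ⟨h1, h2⟩
      · intro hc
        have hkj : k = j.toNat := by omega
        exact pvSelf_not_between _ _ x (Or.inr (by subst hkj; exact hke.symm)) ⟨h1, h2⟩
    exact pvGood_le_alt seq _ _ (List.getElem_mem _) (List.getElem_mem _) hg
  · exact hm'

-- ===== VERDICT (by name: the statement is the Claim_ definition above) =====
theorem max_difference_with_no_intermediates_spec : Claim_equal_max_difference_with_no_intermediates := by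
  intro seq _
  exact le_antisymm (pvALeAlt seq) (pvAltLeA seq)
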